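-- pv_equiv track=rewrite | github.com/dimakarp1996/Website | index.py | remove_nested_parens
-- ===== SOURCE A (Python) =====
-- def remove_nested_parens(input_str):
--     """Returns a copy of 'input_str' with any parenthesized text removed. Nested parentheses are handled."""
--     result = ''
--     paren_level = 0
--     for ch in input_str:
--         if ch == '{':
--             paren_level += 1
--         elif (ch == '}') and paren_level:
--             paren_level -= 1
--         elif not paren_level:
--             result += ch
--     return result
-- ===== SOURCE B (Python) =====
-- def remove_nested_parens(input_str):
--     """Returns a copy of 'input_str' with any parenthesized text removed. Nested parentheses are handled."""
--     def skip(i, depth):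
--         # consume the brace group starting just after a '{'; return index after its matching '}'
--         while depth and i < len(input_str):
--             c = input_str[i]
--             i += 1
--             if c == '{':
--                 depth += 1
--             elif c == '}':
--                 depth -= 1
--         return i
--     out = []
--     i = 0
--     while i < len(input_str):
--         c = input_str[i]
--         if c == '{':
--             i = skip(i + 1, 1)
--         else:
--             out.append(c)
--             i += 1
--     return ''.join(out)
-- ===== Notes on version B (the rewrite author's own statement) =====
-- stated objective: alternative
-- what changed: Replaced the single flat pass carrying a global depth counter (appending only when depth is zero) with a two-level parser: the outer scan copies characters and, on '{', hands off to a separate group-skipping helper that consumes the nested group up to its matching close before the outer scan resumes.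
import Mathlib
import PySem

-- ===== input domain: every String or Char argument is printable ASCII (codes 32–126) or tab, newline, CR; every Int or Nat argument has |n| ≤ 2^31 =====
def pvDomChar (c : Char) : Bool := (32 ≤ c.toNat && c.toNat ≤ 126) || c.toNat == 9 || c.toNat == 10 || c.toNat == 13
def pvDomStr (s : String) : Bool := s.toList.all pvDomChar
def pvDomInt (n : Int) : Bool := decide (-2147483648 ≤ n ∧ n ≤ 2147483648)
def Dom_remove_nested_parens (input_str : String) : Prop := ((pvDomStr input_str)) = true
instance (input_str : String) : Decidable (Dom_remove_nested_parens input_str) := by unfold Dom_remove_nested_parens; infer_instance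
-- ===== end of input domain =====

-- B changes the decomposition only (same cost): a two-level parser with a separate group-skipping helper instead of A's flat depth-counter pass.

-- ===== PORT A =====
-- A's for-loop over the characters, carrying (result, paren_level)
def loopA : List Char → List Char → Int → List Char
  | [], result, _ => result
  | ch :: rest, result, lvl =>
    if ch = '{' then loopA rest result (lvl + 1)
    else if ch = '}' ∧ lvl ≠ 0 then loopA rest result (lvl - 1)
    else if lvl = 0 then loopA rest (result ++ [ch]) lvl
    else loopA rest result lvl

def remove_nested_parens (input_str : String) : String :=
  String.ofList (loopA input_str.toList [] 0)

-- ===== PORT B =====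
-- Source B's inner `skip` loop: consume characters while depth ≠ 0, returning the remainder
def skipB : Nat → List Char → List Char
  | 0, cs => cs
  | _ + 1, [] => []
  | d + 1, c :: rest =>
    if c = '{' then skipB (d + 2) rest
    else if c = '}' then skipB d rest
    else skipB (d + 1) rest

theorem skipB_length_le : ∀ (d : Nat) (cs : List Char), (skipB d cs).length ≤ cs.length := by
  intro d cs
  induction cs generalizing d with
  | nil => cases d <;> simp [skipB]
  | cons c rest ih =>
    cases d with
    | zero => simp [skipB]
    | succ e =>
      simp only [skipB]
      split_ifs <;> exact Nat.le_succ_of_le (ih _)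

-- Source B's outer scan: copy characters, hand '{'-groups to skipB
def goB : List Char → List Char
  | [] => []
  | c :: rest =>
    if c = '{' then goB (skipB 1 rest)
    else c :: goB rest
termination_by cs => cs.length
decreasing_by
  · exact Nat.lt_succ_of_le (skipB_length_le 1 rest)
  · simp

def remove_nested_parens_alt (input_str : String) : String :=
  String.ofList (goB input_str.toList)

-- ===== PRECONDITION & SPEC =====
def Spec_remove_nested_parens (input_str : String) (out : String) : Prop := out = remove_nested_parens_alt input_str
instance (input_str : String) (out : String) : Decidable (Spec_remove_nested_parens input_str out) := by unfold Spec_remove_nested_parens; infer_instance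

-- ===== CLAIM (what is proved, stated in full; the proofs are below) =====
def Claim_equal_remove_nested_parens : Prop := ∀ (input_str : String), Dom_remove_nested_parens input_str → Spec_remove_nested_parens input_str (remove_nested_parens input_str)

-- ===== LEMMAS AND PROOFS =====

-- inside a brace group, A's loop at level d+1 does exactly what skipB (d+1) followed by level 0 does
theorem loopA_pos_eq_skip : ∀ (cs : List Char) (acc : List Char) (d : Nat),
    loopA cs acc ((d : Int) + 1) = loopA (skipB (d + 1) cs) acc 0 := by
  intro cs
  induction cs with
  | nil => intro acc d; simp [skipB, loopA]
  | cons c rest ih =>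
    intro acc d
    by_cases hob : c = '{'
    · have h2 : ((d : Int) + 1) + 1 = ((d + 1 : Nat) : Int) + 1 := by push_cast; ring
      simp only [loopA, skipB, hob, h2]
      exact ih acc (d + 1)
    · by_cases hcb : c = '}'
      · have hne : ((d : Int) + 1) ≠ 0 := by positivity
        simp only [loopA, skipB, hcb, hne]
        cases d with
        | zero => simp [skipB]
        | succ e =>
          have h3 : ((e + 1 : Nat) : Int) + 1 - 1 = ((e : Nat) : Int) + 1 := by push_cast; ring
          rw [h3]
          exact ih acc e
      · have hne : ¬ (c = '}' ∧ ((d : Int) + 1) ≠ 0) := fun h => hcb h.1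
        have hz : ¬ ((d : Int) + 1 = 0) := by positivity
        simp only [loopA, skipB, if_neg hob, if_neg hne, if_neg hcb, if_neg hz]
        exact ih acc d

-- at level 0, A's loop appends goB of the remaining characters
theorem loopA_zero_eq_goB : ∀ (n : Nat) (cs : List Char), cs.length ≤ n →
    ∀ (acc : List Char), loopA cs acc 0 = acc ++ goB cs := by
  intro n
  induction n with
  | zero =>
    intro cs h acc
    have : cs = [] := List.eq_nil_of_length_eq_zero (Nat.le_zero.mp h)
    simp [this, loopA, goB]
  | succ m ih =>
    intro cs h acc
    cases cs with
    | nil => simp [loopA, goB]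
    | cons c rest =>
      simp only [List.length_cons, Nat.succ_le_succ_iff] at h
      by_cases hob : c = '{'
      · have h01 : (0 : Int) + 1 = ((0 : Nat) : Int) + 1 := by norm_num
        simp only [loopA, goB, hob, h01]
        rw [loopA_pos_eq_skip rest acc 0]
        exact ih (skipB 1 rest) (le_trans (skipB_length_le 1 rest) h) acc
      · have hne : ¬ (c = '}' ∧ (0 : Int) ≠ 0) := fun hh => hh.2 rfl
        simp only [loopA, goB, if_neg hob, if_neg hne]
        rw [ih rest h (acc ++ [c])]
        simp

-- ===== VERDICT (by name: the statement is the Claim_ definition above) =====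
theorem remove_nested_parens_spec : Claim_equal_remove_nested_parens := by
  intro s _
  unfold Spec_remove_nested_parens remove_nested_parens remove_nested_parens_alt
  rw [loopA_zero_eq_goB s.toList.length s.toList le_rfl []]
  simp
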